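-- pv_equiv track=rewrite | github.com/jdp71/college-football-predictions | CFDB/update_web_app_model.py | getConference
-- ===== SOURCE A (Python) =====
-- def getConference(team_name):
--     """Get conference for a team"""
--     conferences = {
--         'SEC': ['Alabama', 'Georgia', 'LSU', 'Texas', 'Oklahoma', 'Auburn', 'Florida', 'Tennessee', 'Arkansas', 'Ole Miss', 'Mississippi State', 'South Carolina', 'Missouri', 'Kentucky', 'Vanderbilt', 'Texas A&M'],
--         'Big Ten': ['Ohio State', 'Michigan', 'Penn State', 'Iowa', 'Wisconsin', 'Nebraska', 'Minnesota', 'Purdue', 'Illinois', 'Indiana', 'Northwestern', 'Maryland', 'Rutgers', 'Oregon', 'Washington', 'USC', 'UCLA'],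
--         'Big 12': ['Utah', 'BYU', 'Arizona', 'Arizona State', 'Colorado', 'Kansas', 'Kansas State', 'Oklahoma State', 'TCU', 'Texas Tech', 'Baylor', 'Iowa State', 'Houston', 'UCF', 'Cincinnati', 'West Virginia'],
--         'ACC': ['Florida State', 'Clemson', 'Miami', 'North Carolina', 'Virginia Tech', 'Pittsburgh', 'Louisville', 'Boston College', 'Syracuse', 'Wake Forest', 'Duke', 'Georgia Tech', 'NC State', 'Virginia', 'California', 'Stanford', 'SMU']
--     }
--
--     for conf, teams in conferences.items():
--         if team_name in teams:
--             return conf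
--     return 'Other'
-- ===== SOURCE B (Python) =====
-- # Flat alphabetical team -> conference index consulted once; no loop over conferences at call time.
-- _TEAM_TO_CONF = {
--     'Alabama': 'SEC', 'Arizona': 'Big 12', 'Arizona State': 'Big 12', 'Arkansas': 'SEC',
--     'Auburn': 'SEC', 'BYU': 'Big 12', 'Baylor': 'Big 12', 'Boston College': 'ACC',
--     'California': 'ACC', 'Cincinnati': 'Big 12', 'Clemson': 'ACC', 'Colorado': 'Big 12',
--     'Duke': 'ACC', 'Florida': 'SEC', 'Florida State': 'ACC', 'Georgia': 'SEC',
--     'Georgia Tech': 'ACC', 'Houston': 'Big 12', 'Illinois': 'Big Ten', 'Indiana': 'Big Ten',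
--     'Iowa': 'Big Ten', 'Iowa State': 'Big 12', 'Kansas': 'Big 12', 'Kansas State': 'Big 12',
--     'Kentucky': 'SEC', 'LSU': 'SEC', 'Louisville': 'ACC', 'Maryland': 'Big Ten',
--     'Miami': 'ACC', 'Michigan': 'Big Ten', 'Minnesota': 'Big Ten', 'Mississippi State': 'SEC',
--     'Missouri': 'SEC', 'NC State': 'ACC', 'Nebraska': 'Big Ten', 'North Carolina': 'ACC',
--     'Northwestern': 'Big Ten', 'Ohio State': 'Big Ten', 'Oklahoma': 'SEC',
--     'Oklahoma State': 'Big 12', 'Ole Miss': 'SEC', 'Oregon': 'Big Ten', 'Penn State': 'Big Ten',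
--     'Pittsburgh': 'ACC', 'Purdue': 'Big Ten', 'Rutgers': 'Big Ten', 'SMU': 'ACC',
--     'South Carolina': 'SEC', 'Stanford': 'ACC', 'Syracuse': 'ACC', 'TCU': 'Big 12',
--     'Tennessee': 'SEC', 'Texas': 'SEC', 'Texas A&M': 'SEC', 'Texas Tech': 'Big 12',
--     'UCF': 'Big 12', 'UCLA': 'Big Ten', 'USC': 'Big Ten', 'Utah': 'Big 12',
--     'Vanderbilt': 'SEC', 'Virginia': 'ACC', 'Virginia Tech': 'ACC', 'Wake Forest': 'ACC',
--     'Washington': 'Big Ten', 'West Virginia': 'Big 12', 'Wisconsin': 'Big Ten',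
-- }
--
-- def getConference(team_name):
--     """Get conference for a team"""
--     return _TEAM_TO_CONF.get(team_name, 'Other')
-- ===== Notes on version B (the rewrite author's own statement) =====
-- stated objective: simpler
-- what changed: Replaces the per-call scan over a dict-of-lists with a flat alphabetical team->conference dict literal, so the call body is a single dict lookup with default 'Other' (valid because the 66 team names are pairwise distinct).
import Mathlib
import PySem

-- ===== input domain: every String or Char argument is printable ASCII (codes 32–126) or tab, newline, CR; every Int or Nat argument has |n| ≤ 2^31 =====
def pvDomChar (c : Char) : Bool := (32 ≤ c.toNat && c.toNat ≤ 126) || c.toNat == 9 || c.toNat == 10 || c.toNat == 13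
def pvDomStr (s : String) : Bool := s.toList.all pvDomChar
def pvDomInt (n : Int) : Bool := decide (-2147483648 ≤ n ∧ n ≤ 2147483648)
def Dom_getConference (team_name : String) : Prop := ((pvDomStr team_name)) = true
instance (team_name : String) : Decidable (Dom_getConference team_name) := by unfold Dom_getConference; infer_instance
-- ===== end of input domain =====

-- B replaces A's per-call scan over a dict-of-lists by one lookup in a flat alphabetical team→conference dict literal (the 66 team names are pairwise distinct, so the order of the flat index cannot matter).

-- ===== PORT A =====
-- A's literal conferences dict (insertion order)
def pvConfs : List (String × List String) :=
  [("SEC", ["Alabama", "Georgia", "LSU", "Texas", "Oklahoma", "Auburn", "Florida", "Tennessee", "Arkansas", "Ole Miss", "Mississippi State", "South Carolina", "Missouri", "Kentucky", "Vanderbilt", "Texas A&M"]),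
   ("Big Ten", ["Ohio State", "Michigan", "Penn State", "Iowa", "Wisconsin", "Nebraska", "Minnesota", "Purdue", "Illinois", "Indiana", "Northwestern", "Maryland", "Rutgers", "Oregon", "Washington", "USC", "UCLA"]),
   ("Big 12", ["Utah", "BYU", "Arizona", "Arizona State", "Colorado", "Kansas", "Kansas State", "Oklahoma State", "TCU", "Texas Tech", "Baylor", "Iowa State", "Houston", "UCF", "Cincinnati", "West Virginia"]),
   ("ACC", ["Florida State", "Clemson", "Miami", "North Carolina", "Virginia Tech", "Pittsburgh", "Louisville", "Boston College", "Syracuse", "Wake Forest", "Duke", "Georgia Tech", "NC State", "Virginia", "California", "Stanford", "SMU"])]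

-- A's loop: for conf, teams in conferences.items(): if team_name in teams: return conf
def pvScan (t : String) : List (String × List String) → String
  | [] => "Other"
  | (conf, teams) :: rest => if t ∈ teams then conf else pvScan t rest

def getConference (team_name : String) : String := pvScan team_name pvConfs

-- ===== PORT B =====
-- Source B's literal _TEAM_TO_CONF dict (alphabetical insertion order)
def pvPairs : List (String × String) :=
  [("Alabama", "SEC"),
   ("Arizona", "Big 12"),
   ("Arizona State", "Big 12"),
   ("Arkansas", "SEC"),
   ("Auburn", "SEC"),
   ("BYU", "Big 12"),
   ("Baylor", "Big 12"),
   ("Boston College", "ACC"),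
   ("California", "ACC"),
   ("Cincinnati", "Big 12"),
   ("Clemson", "ACC"),
   ("Colorado", "Big 12"),
   ("Duke", "ACC"),
   ("Florida", "SEC"),
   ("Florida State", "ACC"),
   ("Georgia", "SEC"),
   ("Georgia Tech", "ACC"),
   ("Houston", "Big 12"),
   ("Illinois", "Big Ten"),
   ("Indiana", "Big Ten"),
   ("Iowa", "Big Ten"),
   ("Iowa State", "Big 12"),
   ("Kansas", "Big 12"),
   ("Kansas State", "Big 12"),
   ("Kentucky", "SEC"),
   ("LSU", "SEC"),
   ("Louisville", "ACC"),
   ("Maryland", "Big Ten"),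
   ("Miami", "ACC"),
   ("Michigan", "Big Ten"),
   ("Minnesota", "Big Ten"),
   ("Mississippi State", "SEC"),
   ("Missouri", "SEC"),
   ("NC State", "ACC"),
   ("Nebraska", "Big Ten"),
   ("North Carolina", "ACC"),
   ("Northwestern", "Big Ten"),
   ("Ohio State", "Big Ten"),
   ("Oklahoma", "SEC"),
   ("Oklahoma State", "Big 12"),
   ("Ole Miss", "SEC"),
   ("Oregon", "Big Ten"),
   ("Penn State", "Big Ten"),
   ("Pittsburgh", "ACC"),
   ("Purdue", "Big Ten"),
   ("Rutgers", "Big Ten"),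
   ("SMU", "ACC"),
   ("South Carolina", "SEC"),
   ("Stanford", "ACC"),
   ("Syracuse", "ACC"),
   ("TCU", "Big 12"),
   ("Tennessee", "SEC"),
   ("Texas", "SEC"),
   ("Texas A&M", "SEC"),
   ("Texas Tech", "Big 12"),
   ("UCF", "Big 12"),
   ("UCLA", "Big Ten"),
   ("USC", "Big Ten"),
   ("Utah", "Big 12"),
   ("Vanderbilt", "SEC"),
   ("Virginia", "ACC"),
   ("Virginia Tech", "ACC"),
   ("Wake Forest", "ACC"),
   ("Washington", "Big Ten"),
   ("West Virginia", "Big 12"),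
   ("Wisconsin", "Big Ten")]

def pvIndex : PySem.Dict String String := PySem.Dict.mk pvPairs

-- _TEAM_TO_CONF.get(team_name, 'Other')
def getConference_alt (team_name : String) : String := PySem.Dict.getD pvIndex team_name "Other"

-- ===== PRECONDITION & SPEC =====
def Spec_getConference (team_name : String) (out : String) : Prop := out = getConference_alt team_name
instance (team_name : String) (out : String) : Decidable (Spec_getConference team_name out) := by unfold Spec_getConference; infer_instance

-- ===== CLAIM (what is proved, stated in full; the proofs are below) =====
def Claim_equal_getConference : Prop := ∀ (team_name : String), Dom_getConference team_name → Spec_getConference team_name (getConference team_name)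

-- ===== LEMMAS AND PROOFS =====
-- the 66 team names (= pvIndex's keys; every team of pvConfs is among them)
def pvKeys : List String := ["Alabama", "Arizona", "Arizona State", "Arkansas", "Auburn", "BYU", "Baylor", "Boston College", "California", "Cincinnati", "Clemson", "Colorado", "Duke", "Florida", "Florida State", "Georgia", "Georgia Tech", "Houston", "Illinois", "Indiana", "Iowa", "Iowa State", "Kansas", "Kansas State", "Kentucky", "LSU", "Louisville", "Maryland", "Miami", "Michigan", "Minnesota", "Mississippi State", "Missouri", "NC State", "Nebraska", "North Carolina", "Northwestern", "Ohio State", "Oklahoma", "Oklahoma State", "Ole Miss", "Oregon", "Penn State", "Pittsburgh", "Purdue", "Rutgers", "SMU", "South Carolina", "Stanford", "Syracuse", "TCU", "Tennessee", "Texas", "Texas A&M", "Texas Tech", "UCF", "UCLA", "USC", "Utah", "Vanderbilt", "Virginia", "Virginia Tech", "Wake Forest", "Washington", "West Virginia", "Wisconsin"]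

theorem pv_getD_not_mem (l : List (String × String)) (t d : String) (h : t ∉ l.map Prod.fst) :
    PySem.Dict.getD (PySem.Dict.mk l) t d = d := by
  induction l with
  | nil => rfl
  | cons p rest ih =>
    rw [PySem.Dict.getD_eq_get?_getD, PySem.Dict.get?_mk_cons]
    simp only [List.map_cons, List.mem_cons] at h
    
    have : (p.1 == t) = false := by simp; exact fun e => h (Or.inl e.symm)
    rw [this]
    simp only [Bool.false_eq_true, if_false]
    rw [← PySem.Dict.getD_eq_get?_getD]
    exact ih fun m => h (Or.inr m)

theorem pv_scan_not_mem (confs : List (String × List String)) (t : String)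
    (h : ∀ p ∈ confs, t ∉ p.2) : pvScan t confs = "Other" := by
  induction confs with
  | nil => rfl
  | cons p rest ih =>
    simp only [pvScan]
    rw [if_neg (h p (List.mem_cons_self ..))]
    exact ih fun q hq => h q (List.mem_cons_of_mem _ hq)

set_option maxRecDepth 100000 in
theorem pv_teams_sub : (pvConfs.flatMap (fun p => p.2)).all (fun x => decide (x ∈ pvKeys)) = true := by decide

set_option maxRecDepth 100000 in
theorem pv_index_keys : pvPairs.map Prod.fst = pvKeys := by decide

set_option maxRecDepth 100000 in
theorem pv_equal_on_keys :
    pvKeys.all (fun t => pvScan t pvConfs == PySem.Dict.getD pvIndex t "Other") = true := by decide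

-- ===== VERDICT (by name: the statement is the Claim_ definition above) =====
theorem getConference_spec : Claim_equal_getConference := by
  intro t _
  unfold Spec_getConference getConference getConference_alt
  by_cases h : t ∈ pvKeys
  · have := List.all_eq_true.mp pv_equal_on_keys t h
    exact of_decide_eq_true (by exact_mod_cast this)
  · show pvScan t pvConfs = PySem.Dict.getD (PySem.Dict.mk pvPairs) t "Other"
    rw [pv_scan_not_mem pvConfs t, pv_getD_not_mem _ _ _ (by rw [pv_index_keys]; exact h)]
    intro p hp hmem
    exact h (of_decide_eq_true (List.all_eq_true.mp pv_teams_sub t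
      (List.mem_flatMap.mpr ⟨p, hp, hmem⟩)))
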